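-- pv_equiv track=rewrite | github.com/livasan/transcripts | speech_recognitio.py | convert_to_dialog
-- ===== SOURCE A (Python) =====
-- def convert_to_dialog(transcripts):
--     dialog = []
--     current_speaker = None
--     for transcript in transcripts:
--         text = transcript['text']
--         speaker = 'A' if current_speaker == 'B' else 'B'
--         dialog.append(f"\nSpeaker {speaker}: {text}")
--         current_speaker = speaker
--     return ' '.join(dialog)
-- ===== SOURCE B (Python) =====
-- def convert_to_dialog(transcripts):
--     # Pairwise recursion: each step consumes TWO transcripts, emitting a fixed
--     # "Speaker B" line then a "Speaker A" line; no carried toggle, no index.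
--     def go(ts):
--         if not ts:
--             return []
--         if len(ts) == 1:
--             return ["\nSpeaker B: " + ts[0]['text']]
--         return ["\nSpeaker B: " + ts[0]['text'],
--                 "\nSpeaker A: " + ts[1]['text']] + go(ts[2:])
--     return ' '.join(go(transcripts))
-- ===== Notes on version B (the rewrite author's own statement) =====
-- stated objective: alternative
-- what changed: Replaces A's single pass threading a current_speaker toggle with a recursion that consumes the list two entries per step, emitting a constant 'Speaker B' line and a 'Speaker A' line each step, so no running speaker state or index exists.
import Mathlib
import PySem

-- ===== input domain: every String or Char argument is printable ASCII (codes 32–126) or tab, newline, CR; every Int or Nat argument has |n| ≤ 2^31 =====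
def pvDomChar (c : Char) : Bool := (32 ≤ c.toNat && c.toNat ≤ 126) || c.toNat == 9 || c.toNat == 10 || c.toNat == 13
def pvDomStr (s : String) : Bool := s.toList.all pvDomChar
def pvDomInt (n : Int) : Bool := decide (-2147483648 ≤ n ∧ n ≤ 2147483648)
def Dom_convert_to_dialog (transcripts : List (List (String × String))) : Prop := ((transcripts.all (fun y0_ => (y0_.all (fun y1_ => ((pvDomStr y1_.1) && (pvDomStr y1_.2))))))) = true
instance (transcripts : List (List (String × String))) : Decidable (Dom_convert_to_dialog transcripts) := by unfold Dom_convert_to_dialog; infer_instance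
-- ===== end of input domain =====

-- B replaces A's carried current_speaker toggle with a pairwise recursion consuming
-- two transcripts per step (fixed B-line then A-line each step); objective: alternative.

-- ===== PORT A =====
-- transcript['text'] is exact under Pre_ (key present); Dict.getD is first-match lookup.
def pvALoop (ts : List (List (String × String))) (dialog : List String) (cur : Option String) : List String :=
  match ts with
  | [] => dialog
  | t :: rest =>
    let text := PySem.Dict.getD (PySem.Dict.mk t) "text" ""
    let speaker := if cur == some "B" then "A" else "B"
    pvALoop rest (dialog ++ ["\nSpeaker " ++ speaker ++ ": " ++ text]) (some speaker)

def convert_to_dialog (transcripts : List (List (String × String))) : String :=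
  PySem.Str.join " " (pvALoop transcripts [] none)

-- ===== PORT B =====
def pvBGo : List (List (String × String)) → List String
  | [] => []
  | [t] => ["\nSpeaker B: " ++ PySem.Dict.getD (PySem.Dict.mk t) "text" ""]
  | t :: u :: rest =>
    ["\nSpeaker B: " ++ PySem.Dict.getD (PySem.Dict.mk t) "text" "",
     "\nSpeaker A: " ++ PySem.Dict.getD (PySem.Dict.mk u) "text" ""] ++ pvBGo rest

def convert_to_dialog_alt (transcripts : List (List (String × String))) : String :=
  PySem.Str.join " " (pvBGo transcripts)

-- ===== PRECONDITION & SPEC =====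
-- Pre_ excludes transcripts with an entry lacking the key "text", on which Python A raises KeyError.
def Pre_convert_to_dialog (transcripts : List (List (String × String))) : Prop :=
  (transcripts.all (fun t => (PySem.Dict.mk t).contains "text")) = true
instance (transcripts : List (List (String × String))) : Decidable (Pre_convert_to_dialog transcripts) := by
  unfold Pre_convert_to_dialog; infer_instance

def pvWitness_convert_to_dialog : (List (List (String × String))) :=
  [[("text", "hello")], [("text", "world"), ("x", "y")]]

def Spec_convert_to_dialog (transcripts : List (List (String × String))) (out : String) : Prop := out = convert_to_dialog_alt transcripts
instance (transcripts : List (List (String × String))) (out : String) : Decidable (Spec_convert_to_dialog transcripts out) := by unfold Spec_convert_to_dialog; infer_instance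

-- ===== CLAIM (what is proved, stated in full; the proofs are below) =====
def Claim_equal_convert_to_dialog : Prop := ∀ (transcripts : List (List (String × String))), Dom_convert_to_dialog transcripts → Pre_convert_to_dialog transcripts → Spec_convert_to_dialog transcripts (convert_to_dialog transcripts)

-- ===== LEMMAS AND PROOFS =====

-- A's loop, started with a non-"B" speaker state, equals B's pairwise recursion.
lemma pvALoop_eq_pvBGo (ts : List (List (String × String))) :
    ∀ (dialog : List String) (cur : Option String),
      (cur == some "B") = false →
      pvALoop ts dialog cur = dialog ++ pvBGo ts := by
  induction ts using pvBGo.induct with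
  | case1 => intro dialog cur _; simp [pvALoop, pvBGo]
  | case2 t =>
    intro dialog cur h
    simp [pvALoop, pvBGo, h]
  | case3 t u rest ih =>
    intro dialog cur h
    simp only [pvALoop, pvBGo, h]
    rw [ih _ _ (by decide)]
    simp

-- ===== VERDICT (by name: the statement is the Claim_ definition above) =====
theorem convert_to_dialog_spec : Claim_equal_convert_to_dialog := by
  intro transcripts _ _
  unfold Spec_convert_to_dialog convert_to_dialog convert_to_dialog_alt
  rw [pvALoop_eq_pvBGo transcripts [] none (by decide)]
  rfl
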